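-- pv_equiv track=rewrite | github.com/JusteRaimbault/SemanticPatents | TextProcessing/data.py | extract_sub_dicos
-- ===== SOURCE A (Python) =====
-- def extract_sub_dicos(corpus,occurence_dicos) :
--     p_kw_dico_all = occurence_dicos[0]
--     kw_p_dico_all = occurence_dicos[1]
--
--     p_kw_dico = dict()
--     kw_p_dico = dict()
--
--     for patent in corpus :
--         #patent_id = data.get_patent_id(patent)
--         patent_id=patent[0]
--         keywords = []
--         if patent_id in p_kw_dico_all : keywords = p_kw_dico_all[patent_id]
--         p_kw_dico[patent_id] = keywords
--         for k in keywords :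
--             if k not in kw_p_dico : kw_p_dico[k] = []
--             kw_p_dico[k].append(patent_id)
--
--     return([p_kw_dico,kw_p_dico])
-- ===== SOURCE B (Python) =====
-- def extract_sub_dicos(corpus, occurence_dicos):
--     p_kw_dico_all = occurence_dicos[0]
--
--     # forward map: one entry per distinct patent id, in first-occurrence order
--     ids = list(dict.fromkeys(p[0] for p in corpus))
--     p_kw_dico = {pid: p_kw_dico_all.get(pid, []) for pid in ids}
--
--     # reverse map: flatten the corpus into a (keyword, patent_id) pair stream,
--     # then group it by keyword with a per-key filter over the stream
--     pairs = [(k, p[0]) for p in corpus for k in p_kw_dico_all.get(p[0], [])]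
--     kws = list(dict.fromkeys(k for k, _ in pairs))
--     kw_p_dico = {k: [pid for k2, pid in pairs if k2 == k] for k in kws}
--
--     return [p_kw_dico, kw_p_dico]
-- ===== Notes on version B (the rewrite author's own statement) =====
-- stated objective: alternative
-- what changed: A's single loop threading two incrementally-updated dicts (membership test, setdefault-style append) is replaced by building a flattened (keyword, patent_id) pair stream and constructing each sub-dictionary as a comprehension over first-occurrence-deduplicated keys with a per-key filter over the stream; Pre_ excludes occurence_dicos with fewer than two elements, where A raises IndexError.
import Mathlib
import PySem

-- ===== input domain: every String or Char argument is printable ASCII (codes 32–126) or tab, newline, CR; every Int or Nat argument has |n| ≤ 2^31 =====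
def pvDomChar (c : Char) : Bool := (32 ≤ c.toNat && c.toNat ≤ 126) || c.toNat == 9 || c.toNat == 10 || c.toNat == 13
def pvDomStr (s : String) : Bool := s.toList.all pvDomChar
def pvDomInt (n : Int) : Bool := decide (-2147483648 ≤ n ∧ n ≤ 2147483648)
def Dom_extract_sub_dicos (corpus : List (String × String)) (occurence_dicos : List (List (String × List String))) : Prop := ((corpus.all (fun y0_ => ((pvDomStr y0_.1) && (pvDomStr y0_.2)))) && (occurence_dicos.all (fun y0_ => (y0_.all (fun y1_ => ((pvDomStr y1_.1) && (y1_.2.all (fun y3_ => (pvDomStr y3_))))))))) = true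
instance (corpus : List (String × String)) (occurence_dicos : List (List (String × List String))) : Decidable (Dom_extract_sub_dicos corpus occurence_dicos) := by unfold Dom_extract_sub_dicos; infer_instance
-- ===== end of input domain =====

-- B replaces A's single loop threading two incrementally-updated dicts by a flattened
-- (keyword, patent_id) pair stream grouped per deduplicated key (alternative decomposition).

-- ===== PORT A =====
-- A: one loop over corpus, updating both dicts in the same iteration.
def extract_sub_dicos (corpus : List (String × String)) (occurence_dicos : List (List (String × List String))) : List (List (String × List String)) :=
  match PySem.List.pyGet? occurence_dicos 0, PySem.List.pyGet? occurence_dicos 1 with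
  | some pkall_items, some _ =>
    let p_kw_dico_all : PySem.Dict String (List String) := ⟨pkall_items⟩
    let st :=
      corpus.foldl
        (fun (st : PySem.Dict String (List String) × PySem.Dict String (List String)) patent =>
          let patent_id := patent.1
          let keywords : List String :=
            if p_kw_dico_all.contains patent_id then p_kw_dico_all.getD patent_id [] else []
          let p_kw_dico := st.1.insert patent_id keywords
          let kw_p_dico :=
            keywords.foldl
              (fun kw k =>
                let kw := if kw.contains k then kw else kw.insert k []
                kw.insert k (kw.getD k [] ++ [patent_id]))
              st.2
          (p_kw_dico, kw_p_dico))
        (PySem.Dict.empty, PySem.Dict.empty)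
    [st.1.items, st.2.items]
  | _, _ => []   -- Python raises IndexError here; excluded by Pre_

-- ===== PORT B =====
def extract_sub_dicos_alt (corpus : List (String × String)) (occurence_dicos : List (List (String × List String))) : List (List (String × List String)) :=
  match PySem.List.pyGet? occurence_dicos 0 with
  | none => []   -- Python raises IndexError here; excluded by Pre_
  | some pkall_items =>
    let p_kw_dico_all : PySem.Dict String (List String) := ⟨pkall_items⟩
    -- forward map: one entry per distinct patent id, first-occurrence order
    let ids : List String := PySem.List.dedup (corpus.map (fun p => p.1))
    let p_kw_dico := ids.map (fun pid => (pid, p_kw_dico_all.getD pid []))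
    -- reverse map: flattened pair stream, grouped per deduplicated keyword by a filter
    let pairs : List (String × String) :=
      corpus.flatMap (fun p => (p_kw_dico_all.getD p.1 []).map (fun k => (k, p.1)))
    let kws : List String := PySem.List.dedup (pairs.map (fun q => q.1))
    let kw_p_dico := kws.map (fun k => (k, (pairs.filter (fun q => q.1 == k)).map (fun q => q.2)))
    [p_kw_dico, kw_p_dico]

-- ===== PRECONDITION & SPEC =====
-- Pre_: Python A raises IndexError on occurence_dicos[1] (or [0]) when the list has
-- fewer than two elements; exactly those inputs are excluded.
def Pre_extract_sub_dicos (corpus : List (String × String)) (occurence_dicos : List (List (String × List String))) : Prop := 2 ≤ occurence_dicos.length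
instance (corpus : List (String × String)) (occurence_dicos : List (List (String × List String))) : Decidable (Pre_extract_sub_dicos corpus occurence_dicos) := by unfold Pre_extract_sub_dicos; infer_instance

def pvWitness_extract_sub_dicos : (List (String × String)) × (List (List (String × List String))) :=
  ([("p1", "text"), ("p2", "other")], [[("p1", ["kw1", "kw2"])], []])

def Spec_extract_sub_dicos (corpus : List (String × String)) (occurence_dicos : List (List (String × List String))) (out : List (List (String × List String))) : Prop := out = extract_sub_dicos_alt corpus occurence_dicos
instance (corpus : List (String × String)) (occurence_dicos : List (List (String × List String))) (out : List (List (String × List String))) : Decidable (Spec_extract_sub_dicos corpus occurence_dicos out) := by unfold Spec_extract_sub_dicos; infer_instance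

-- ===== CLAIM (what is proved, stated in full; the proofs are below) =====
def Claim_equal_extract_sub_dicos : Prop := ∀ (corpus : List (String × String)) (occurence_dicos : List (List (String × List String))), Dom_extract_sub_dicos corpus occurence_dicos → Pre_extract_sub_dicos corpus occurence_dicos → Spec_extract_sub_dicos corpus occurence_dicos (extract_sub_dicos corpus occurence_dicos)

-- ===== LEMMAS AND PROOFS =====

-- The guarded lookup in A equals getD.
theorem guarded_getD (d : PySem.Dict String (List String)) (k : String) :
    (if d.contains k then d.getD k [] else []) = d.getD k [] := by
  by_cases h : d.contains k
  · simp [h]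
  · simp [h, PySem.Dict.getD_of_not_contains]

-- A's "if k not in kw: kw[k]=[]; kw[k].append(pid)" equals modify k [] (· ++ [pid]).
theorem step_eq_modify (kw : PySem.Dict String (List String)) (k pid : String) :
    ((if kw.contains k then kw else kw.insert k []).insert k
      ((if kw.contains k then kw else kw.insert k []).getD k [] ++ [pid]))
      = kw.modify k [] (· ++ [pid]) := by
  by_cases h : kw.contains k
  · simp only [h, if_true, PySem.Dict.modify]
  · have hnc : kw.contains k = false := by simpa using h
    simp [hnc, PySem.Dict.modify,
      PySem.Dict.getD_insert_self, PySem.Dict.insert_insert_self,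
      PySem.Dict.getD_of_not_contains]

-- value of an insert-fold whose inserted value depends only on the key
theorem getD_foldl_insert_fn (l : List (String × String)) (f : String → List String)
    (d : PySem.Dict String (List String)) (c : String) :
    (l.foldl (fun d p => d.insert p.1 (f p.1)) d).getD c []
      = if c ∈ l.map (fun p => p.1) then f c else d.getD c [] := by
  induction l generalizing d with
  | nil => simp
  | cons p t ih =>
    simp only [List.foldl_cons, ih, List.map_cons, List.mem_cons]
    by_cases h : c ∈ t.map (fun p => p.1)
    · simp [h]
    · by_cases hc : c = p.1
      · simp [hc]
      · simp [h, hc, PySem.Dict.getD_insert]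

-- a nested per-patent/per-keyword append loop is one loop over the flattened pair stream
theorem foldl_nested_modify (corpus : List (String × String)) (g : String → List String)
    (d : PySem.Dict String (List String)) :
    corpus.foldl (fun d p => (g p.1).foldl (fun kw k => kw.modify k [] (· ++ [p.1])) d) d
      = (corpus.flatMap (fun p => (g p.1).map (fun k => (k, p.1)))).foldl
          (fun d q => d.modify q.1 [] (· ++ [q.2])) d := by
  induction corpus generalizing d with
  | nil => rfl
  | cons p t ih =>
    simp only [List.foldl_cons, List.flatMap_cons, List.foldl_append, List.foldl_map, ih]

-- the forward insert-loop's items are the deduplicated ids paired with their lookup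
theorem itemsF_char (corpus : List (String × String)) (pk : PySem.Dict String (List String)) :
    (corpus.foldl (fun d p => d.insert p.1 (pk.getD p.1 [])) PySem.Dict.empty).items
      = (PySem.Set.ofList (corpus.map (fun p => p.1))).map (fun k => (k, pk.getD k [])) := by
  have hnod : (corpus.foldl (fun d p => d.insert p.1 (pk.getD p.1 [])) PySem.Dict.empty).keys.Nodup :=
    PySem.Dict.nodup_keys_foldl_insert_key corpus (fun p => p.1) (fun _ p => pk.getD p.1 [])
      PySem.Dict.empty (by simp)
  rw [PySem.Dict.items_eq_map_keys _ hnod [],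
      PySem.Dict.keys_foldl_insert_key, PySem.Dict.keys_empty, PySem.Set.update_nil_left]
  apply List.map_congr_left
  intro k hk
  have hm : k ∈ corpus.map (fun p => p.1) := (PySem.Set.mem_ofList _ _).mp hk
  rw [getD_foldl_insert_fn corpus (fun x => pk.getD x [])]
  simp [hm]

-- the reverse append-loop's items are the deduplicated keywords with their filtered pids
theorem itemsR_char (pairs : List (String × String)) :
    (pairs.foldl (fun d q => d.modify q.1 [] (· ++ [q.2])) PySem.Dict.empty).items
      = (PySem.Set.ofList (pairs.map (fun q => q.1))).map
          (fun k => (k, (pairs.filter (fun q => q.1 == k)).map (fun q => q.2))) := by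
  have hnod : (pairs.foldl (fun d q => d.modify q.1 [] (· ++ [q.2])) PySem.Dict.empty).keys.Nodup :=
    PySem.Dict.nodup_keys_foldl_modify_key pairs (fun q => q.1) [] (fun _ q => (· ++ [q.2]))
      PySem.Dict.empty (by simp)
  rw [PySem.Dict.items_eq_map_keys _ hnod [],
      PySem.Dict.keys_foldl_modify_key, PySem.Dict.keys_empty, PySem.Set.update_nil_left]
  apply List.map_congr_left
  intro k hk
  rw [PySem.Dict.getD_foldl_modify_append]
  simp

-- ===== VERDICT (by name: the statement is the Claim_ definition above) =====
theorem extract_sub_dicos_spec : Claim_equal_extract_sub_dicos := by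
  intro corpus occ _ hpre
  have hp : 2 ≤ occ.length := hpre
  have h1' : (0:Nat) < occ.length := by omega
  have h2' : (1:Nat) < occ.length := by omega
  have h0s : (PySem.List.pyGet? occ 0).isSome := by
    simp [PySem.List.pyGet?, PySem.List.pyIdx?, h1']
  have h1s : (PySem.List.pyGet? occ 1).isSome := by
    simp [PySem.List.pyGet?, PySem.List.pyIdx?, h2']
  unfold Spec_extract_sub_dicos extract_sub_dicos extract_sub_dicos_alt
  cases h0 : PySem.List.pyGet? occ 0 with
  | none => simp [h0] at h0s
  | some pkall =>
    cases h1 : PySem.List.pyGet? occ 1 with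
    | none => simp [h1] at h1s
    | some _ =>
      simp only []
      rw [PySem.List.foldl_prod_mk
        (f := fun (d : PySem.Dict String (List String)) (patent : String × String) =>
          d.insert patent.1
            (if (PySem.Dict.mk pkall).contains patent.1 then (PySem.Dict.mk pkall).getD patent.1 [] else []))
        (g := fun (kw : PySem.Dict String (List String)) (patent : String × String) =>
          (if (PySem.Dict.mk pkall).contains patent.1 then (PySem.Dict.mk pkall).getD patent.1 [] else []).foldl
            (fun kw k =>
              (if kw.contains k then kw else kw.insert k []).insert k
                ((if kw.contains k then kw else kw.insert k []).getD k [] ++ [patent.1])) kw)]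
      simp only [guarded_getD, step_eq_modify]
      rw [foldl_nested_modify corpus (fun pid => (PySem.Dict.mk pkall).getD pid [])]
      rw [itemsF_char, itemsR_char]
      simp [PySem.List.dedup_eq_ofList]
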